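-- pv_equiv track=rewrite | github.com/Beliavsky/Pure-Fortran | xmodularize.py | split_code_comment
-- ===== SOURCE A (Python) =====
-- from typing import Dict, Iterable, List, Optional, Sequence, Set, Tuple
--
-- def split_code_comment(line: str) -> Tuple[str, str]:
--     in_single = False
--     in_double = False
--     for i, ch in enumerate(line):
--         if ch == "'" and not in_double:
--             in_single = not in_single
--         elif ch == '"' and not in_single:
--             in_double = not in_double
--         elif ch == "!" and not in_single and not in_double:
--             return line[:i], line[i:]
--     return line, ""
-- ===== SOURCE B (Python) =====
-- def split_code_comment(line):
--     # Jump over quoted spans with str.find instead of tracking quote state per char.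
--     i, n = 0, len(line)
--     while i < n:
--         ch = line[i]
--         if ch == "'" or ch == '"':
--             j = line.find(ch, i + 1)
--             i = n if j == -1 else j + 1
--         elif ch == "!":
--             return line[:i], line[i:]
--         else:
--             i += 1
--     return line, ""
-- ===== Notes on version B (the rewrite author's own statement) =====
-- stated objective: alternative
-- what changed: Replaces the per-character two-boolean quote-state machine with a stateless cursor that, on seeing a quote, jumps straight past the matching closing quote via str.find (unterminated quote runs to end of line).
import Mathlib
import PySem

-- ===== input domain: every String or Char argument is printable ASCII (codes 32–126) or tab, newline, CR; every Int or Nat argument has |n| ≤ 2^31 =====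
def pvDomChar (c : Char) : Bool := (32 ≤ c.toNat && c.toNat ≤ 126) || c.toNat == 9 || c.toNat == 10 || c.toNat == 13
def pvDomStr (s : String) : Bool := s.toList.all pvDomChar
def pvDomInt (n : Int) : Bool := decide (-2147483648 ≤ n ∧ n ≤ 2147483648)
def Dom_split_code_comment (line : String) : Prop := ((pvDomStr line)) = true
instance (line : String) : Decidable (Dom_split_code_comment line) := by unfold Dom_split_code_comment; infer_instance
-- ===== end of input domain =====

-- B replaces A's per-character two-boolean quote-state machine with a stateless cursor
-- that jumps past each quoted span via str.find (alternative decomposition, same cost).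


-- ===== PORT A =====
-- the for-loop over enumerate(line) with the two booleans; line[:i]/line[i:] with
-- 0 ≤ i ≤ len are take/drop (exact there)
def splitA_go (line : String) (cs : List Char) (i : Nat) (rest : List Char)
    (s d : Bool) : String × String :=
  match rest with
  | [] => (line, "")
  | ch :: t =>
    if ch = '\'' ∧ d = false then splitA_go line cs (i+1) t (!s) d
    else if ch = '"' ∧ s = false then splitA_go line cs (i+1) t s (!d)
    else if ch = '!' ∧ s = false ∧ d = false then
      (String.mk (cs.take i), String.mk (cs.drop i))
    else splitA_go line cs (i+1) t s d

def split_code_comment (line : String) : String × String :=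
  splitA_go line line.toList 0 line.toList false false

-- ===== PORT B =====
-- hand port of line.find(ch, i+1) for a single-character needle: first index ≥ start
-- holding ch, else -1; exact for 0 ≤ start (a start past len gives -1, as in CPython)
def pyFindCharFrom (cs : List Char) (c : Char) (start : Nat) : Int :=
  match (cs.drop start).findIdx? (· = c) with
  | some k => ((start + k : Nat) : Int)
  | none => -1

-- the while loop of Source B; fuel only totalizes it (i strictly increases, proved below)
def splitB_go (line : String) (cs : List Char) (n i : Nat) (fuel : Nat) : String × String :=
  match fuel with
  | 0 => (line, "")
  | fuel + 1 =>
    if i < n then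
      let ch := cs.getD i ' '
      if ch = '\'' ∨ ch = '"' then
        let j := pyFindCharFrom cs ch (i + 1)
        splitB_go line cs n (if j = -1 then n else j.toNat + 1) fuel
      else if ch = '!' then (String.mk (cs.take i), String.mk (cs.drop i))
      else splitB_go line cs n (i + 1) fuel
    else (line, "")

def split_code_comment_alt (line : String) : String × String :=
  splitB_go line line.toList line.toList.length 0 (line.toList.length + 1)

-- ===== PRECONDITION & SPEC =====
def Spec_split_code_comment (line : String) (out : String × String) : Prop := out = split_code_comment_alt line
instance (line : String) (out : String × String) : Decidable (Spec_split_code_comment line out) := by unfold Spec_split_code_comment; infer_instance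

-- ===== CLAIM (what is proved, stated in full; the proofs are below) =====
def Claim_equal_split_code_comment : Prop := ∀ (line : String), Dom_split_code_comment line → Spec_split_code_comment line (split_code_comment line)

-- ===== LEMMAS AND PROOFS =====

-- A in the single-quote state skips everything up to (and including) the next '
theorem splitA_single (line : String) (cs : List Char) :
    ∀ (t : List Char) (i : Nat), splitA_go line cs i t true false =
      match t.findIdx? (· = '\'') with
      | some k => splitA_go line cs (i + k + 1) (t.drop (k + 1)) false false
      | none => (line, "") := by
  intro t
  induction t with
  | nil => intro i; simp [splitA_go, List.findIdx?_nil]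
  | cons ch t ih =>
    intro i
    by_cases hc : ch = '\''
    · subst hc
      simp [splitA_go, List.findIdx?_cons]
    · rw [splitA_go]
      have h1 : ¬ (ch = '\'' ∧ (false : Bool) = false) := by simp [hc]
      have h2 : ¬ (ch = '"' ∧ (true : Bool) = false) := by simp
      have h3 : ¬ (ch = '!' ∧ (true : Bool) = false ∧ (false : Bool) = false) := by simp
      rw [if_neg h1, if_neg h2, if_neg h3, ih]
      simp only [List.findIdx?_cons, decide_eq_true_eq, if_neg hc]
      cases hf : t.findIdx? (· = '\'') with
      | none => rfl
      | some k =>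
        simp only [hf, Option.map_some]
        have : i + 1 + k + 1 = i + (k + 1) + 1 := by omega
        rw [this, List.drop_succ_cons]

-- A in the double-quote state skips everything up to (and including) the next "
theorem splitA_double (line : String) (cs : List Char) :
    ∀ (t : List Char) (i : Nat), splitA_go line cs i t false true =
      match t.findIdx? (· = '"') with
      | some k => splitA_go line cs (i + k + 1) (t.drop (k + 1)) false false
      | none => (line, "") := by
  intro t
  induction t with
  | nil => intro i; simp [splitA_go, List.findIdx?_nil]
  | cons ch t ih =>
    intro i
    by_cases hc : ch = '"'
    · subst hc
      rw [splitA_go]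
      have h1 : ¬ (('"' : Char) = '\'' ∧ (true : Bool) = false) := by simp
      rw [if_neg h1, if_pos ⟨rfl, rfl⟩]
      simp [List.findIdx?_cons]
    · rw [splitA_go]
      have h1 : ¬ (ch = '\'' ∧ (true : Bool) = false) := by simp
      have h2 : ¬ (ch = '"' ∧ (false : Bool) = false) := by simp [hc]
      have h3 : ¬ (ch = '!' ∧ (false : Bool) = false ∧ (true : Bool) = false) := by simp
      rw [if_neg h1, if_neg h2, if_neg h3, ih]
      simp only [List.findIdx?_cons, decide_eq_true_eq, if_neg hc]
      cases hf : t.findIdx? (· = '"') with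
      | none => rfl
      | some k =>
        simp only [hf, Option.map_some]
        have : i + 1 + k + 1 = i + (k + 1) + 1 := by omega
        rw [this, List.drop_succ_cons]

theorem splitA_past_end (line : String) (cs : List Char) (i : Nat)
    (h : cs.length ≤ i) : splitA_go line cs i (cs.drop i) false false = (line, "") := by
  rw [List.drop_eq_nil_of_le h, splitA_go]

-- main induction: B's cursor loop equals A's state machine in the neutral state
theorem splitB_eq_A (line : String) (cs : List Char) :
    ∀ (fuel i : Nat), cs.length - i < fuel →
      splitB_go line cs cs.length i fuel =
        splitA_go line cs i (cs.drop i) false false := by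
  intro fuel
  induction fuel with
  | zero => intro i h; omega
  | succ fuel ih =>
    intro i hfuel
    rw [splitB_go]
    by_cases hi : i < cs.length
    · rw [if_pos hi]
      have hdrop : cs.drop i = cs[i] :: cs.drop (i + 1) := List.drop_eq_getElem_cons hi
      have hgetD : cs.getD i ' ' = cs[i] := List.getD_eq_getElem cs ' ' hi
      simp only [hgetD]
      by_cases hq : cs[i] = '\'' ∨ cs[i] = '"'
      · rw [if_pos hq]
        -- A side: enters the quote state, then the skip lemma applies
        have hA : splitA_go line cs i (cs.drop i) false false =
            match (cs.drop (i+1)).findIdx? (· = cs[i]) with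
            | some k => splitA_go line cs (i + 1 + k + 1) ((cs.drop (i+1)).drop (k + 1)) false false
            | none => (line, "") := by
          rw [hdrop, splitA_go]
          rcases hq with hq | hq
          · rw [if_pos ⟨hq, rfl⟩, Bool.not_false, hq, splitA_single]
          · have h1 : ¬ (cs[i] = '\'' ∧ (false : Bool) = false) := by simp [hq]
            rw [if_neg h1, if_pos ⟨hq, rfl⟩, Bool.not_false, hq, splitA_double]
        rw [hA]
        unfold pyFindCharFrom
        cases hf : (cs.drop (i+1)).findIdx? (· = cs[i]) with
        | none =>
          simp only [hf]
          rw [if_pos trivial, ih _ (by omega), splitA_past_end line cs cs.length (le_refl _)]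
        | some k =>
          have hk : i + 1 + k < cs.length := by
            have := List.findIdx?_eq_some_iff_findIdx_eq.mp hf
            have hkl : k < (cs.drop (i+1)).length := this.1
            simp [List.length_drop] at hkl
            omega
          simp only [hf]
          have hne : ¬ (((i + 1 + k : Nat) : Int) = -1) := by omega
          rw [if_neg hne]
          have htn : ((i + 1 + k : Nat) : Int).toNat = i + 1 + k := Int.toNat_natCast _
          rw [htn, ih _ (by omega)]
          have : (cs.drop (i+1)).drop (k + 1) = cs.drop (i + 1 + k + 1) := by
            rw [List.drop_drop]; ring_nf
          rw [this]
      · rw [if_neg hq]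
        push_neg at hq
        by_cases hb : cs[i] = '!'
        · rw [if_pos hb, hdrop, splitA_go]
          have h1 : ¬ (cs[i] = '\'' ∧ (false : Bool) = false) := by simp [hq.1]
          have h2 : ¬ (cs[i] = '"' ∧ (false : Bool) = false) := by simp [hq.2]
          rw [if_neg h1, if_neg h2, if_pos ⟨hb, rfl, rfl⟩, ← hdrop]
        · rw [if_neg hb, ih _ (by omega), hdrop, splitA_go]
          have h1 : ¬ (cs[i] = '\'' ∧ (false : Bool) = false) := by simp [hq.1]
          have h2 : ¬ (cs[i] = '"' ∧ (false : Bool) = false) := by simp [hq.2]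
          have h3 : ¬ (cs[i] = '!' ∧ (false : Bool) = false ∧ (false : Bool) = false) := by
            simp [hb]
          rw [if_neg h1, if_neg h2, if_neg h3]
    · rw [if_neg hi, splitA_past_end line cs i (by omega)]

-- ===== VERDICT (by name: the statement is the Claim_ definition above) =====
theorem split_code_comment_spec : Claim_equal_split_code_comment := by
  intro line _
  unfold Spec_split_code_comment split_code_comment split_code_comment_alt
  rw [splitB_eq_A line line.toList (line.toList.length + 1) 0 (by omega)]
  simp
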